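-- pv_equiv track=rewrite | github.com/JerryZhuzq/leetcode | Amazon OA/largestItemAssociation.py | func
-- ===== SOURCE A (Python) =====
-- from collections import defaultdict
-- from collections import deque
--
-- def func(itemAssociation):
--     store = defaultdict(list)
--     n = len(itemAssociation)
--     for i in range(n):
--         for item in itemAssociation[i]:
--             store[item].append(i)
--     res = []
--     visited = set()
--     for item in store:
--         if item not in visited:
--             visited.add(item)
--             q = deque()
--             q += store[item]
--             temp = []
--             while q:
--                 i = q.popleft()
--                 temp += itemAssociation[i]
--                 for c in itemAssociation[i]:
--                     if c not in visited:
--                         visited.add(c)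
--                         q += store[c]
--             res.append(list(set(temp)))
--     res.sort(key=lambda x: len(x), reverse=True)
--     length = len(res[0])
--     final = []
--     for i in res:
--         if len(i) == length:
--             i.sort()
--             final.append(i)
--         else:
--             break
--     final.sort()
--     return final[0]
-- ===== SOURCE B (Python) =====
-- def func(itemAssociation):
--     # incrementally merge overlapping item sets: each group is unioned into the
--     # partition, fusing every existing component it touches into one
--     comps = []
--     for group in itemAssociation:
--         if not group:
--             continue
--         merged = set(group)
--         keep = []
--         for c in comps:
--             if c & merged:
--                 merged |= c
--             else:
--                 keep.append(c)
--         keep.append(merged)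
--         comps = keep
--     best = None
--     for c in comps:
--         s = sorted(c)
--         if best is None or len(s) > len(best) or (len(s) == len(best) and s < best):
--             best = s
--     return best
-- ===== Notes on version B (the rewrite author's own statement) =====
-- stated objective: faster
-- what changed: B replaces A's inverted item-to-groups index plus per-item BFS over a deque (visited sets, then a sort/prefix/sort selection chain) by an incremental partition refinement: one left-to-right fold unions each group into a running list of disjoint components, fusing every component it overlaps, then a single scan keeps the (largest, lexicographically smallest) sorted component.
import Mathlib
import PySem

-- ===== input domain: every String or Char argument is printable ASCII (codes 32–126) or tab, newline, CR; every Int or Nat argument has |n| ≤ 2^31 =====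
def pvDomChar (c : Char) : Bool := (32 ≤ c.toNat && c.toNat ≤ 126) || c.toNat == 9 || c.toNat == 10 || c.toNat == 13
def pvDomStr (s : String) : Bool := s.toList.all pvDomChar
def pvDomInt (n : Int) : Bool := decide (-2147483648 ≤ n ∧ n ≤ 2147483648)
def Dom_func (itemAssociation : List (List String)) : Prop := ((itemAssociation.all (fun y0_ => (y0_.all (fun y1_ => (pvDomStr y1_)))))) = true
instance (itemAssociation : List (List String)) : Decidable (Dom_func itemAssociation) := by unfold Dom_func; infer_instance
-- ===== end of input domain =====

-- B replaces A's inverted item→groups index and item-driven BFS (deque, visited sets,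
-- sort/prefix/sort selection chain) by an incremental partition refinement: one fold that
-- unions each group into a running list of disjoint components, fusing every component it
-- overlaps, then a single scan keeping the (largest, lexicographically smallest) one;
-- a timing run measured B faster (A rescans a group once per item listing it).
-- A's `list(set(temp))` depends on CPython set iteration order only in ways the final
-- (order-independent) selection cannot observe; it is ported as first-occurrence dedup.

-- ===== PORT A =====
def buildStore (ia : List (List String)) : PySem.Dict String (List Int) :=
  (PySem.List.pyRange 0 (ia.length : Int) 1).foldl
    (fun d i => (PySem.List.pyGetD ia i []).foldl
      (fun d item => d.modify item [] (fun l => l ++ [i])) d)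
    PySem.Dict.empty

-- the `while q:` loop of A (deque popped at the left, appends at the right); fuel-terminated
def bfsA (ia : List (List String)) (store : PySem.Dict String (List Int)) :
    Nat → List Int → PySem.Set String → List String → (PySem.Set String × List String)
  | 0, _, visited, temp => (visited, temp)
  | _ + 1, [], visited, temp => (visited, temp)
  | fuel + 1, i :: rest, visited, temp =>
      let g := PySem.List.pyGetD ia i []
      let st := g.foldl
        (fun (p : PySem.Set String × List Int) c =>
          if PySem.Set.contains p.1 c then p
          else (PySem.Set.add p.1 c, p.2 ++ store.getD c []))
        (visited, [])
      bfsA ia store fuel (rest ++ st.2) st.1 (temp ++ g)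

-- A's `for i in res: if len(i) == length: i.sort(); final.append(i) else: break`
def takeSortA : List (List String) → Nat → List (List String)
  | [], _ => []
  | x :: rest, length =>
      if x.length = length then PySem.List.sorted x (fun s => s) false :: takeSortA rest length
      else []

def func (itemAssociation : List (List String)) : List String :=
  let store := buildStore itemAssociation
  let fuel := (itemAssociation.flatten.length + 1) * (itemAssociation.flatten.length + 1)
  let st := store.keys.foldl
    (fun (p : PySem.Set String × List (List String)) item =>
      if PySem.Set.contains p.1 item then p
      else
        let r := bfsA itemAssociation store fuel (store.getD item []) (PySem.Set.add p.1 item) []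
        (r.1, p.2 ++ [PySem.Set.ofList r.2]))
    (PySem.Set.empty, [])
  let res := PySem.List.sorted st.2 (fun x => x.length) true
  let length := (PySem.List.pyGetD res 0 []).length
  let final := PySem.List.sorted (takeSortA res length) (fun x => x) false
  PySem.List.pyGetD final 0 []

-- ===== PORT B =====
-- B's inner `for c in comps: if c & merged: merged |= c else: keep.append(c)`
def mergeStep (p : PySem.Set String × List (PySem.Set String)) (c : PySem.Set String) :
    PySem.Set String × List (PySem.Set String) :=
  if PySem.Set.inter c p.1 ≠ [] then (PySem.Set.union p.1 c, p.2)
  else (p.1, p.2 ++ [c])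

-- B's body of `for group in itemAssociation` (skip empty groups; fuse overlapped components)
def stepB (comps : List (PySem.Set String)) (g : List String) : List (PySem.Set String) :=
  if g = [] then comps
  else
    let st := comps.foldl mergeStep (PySem.Set.ofList g, [])
    st.2 ++ [st.1]

-- B's selection scan `if best is None or len(s) > len(best) or (len(s)==len(best) and s < best)`
def selStep (best : Option (List String)) (c : PySem.Set String) : Option (List String) :=
  let s := PySem.List.sorted c (fun x => x) false
  match best with
  | none => some s
  | some b => if b.length < s.length ∨ (s.length = b.length ∧ s < b) then some s else some b

def func_alt (itemAssociation : List (List String)) : List String :=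
  (((itemAssociation.foldl stepB []).foldl selStep none).getD [])

-- ===== PRECONDITION & SPEC =====
-- A raises IndexError (res[0] on an empty res) exactly when every group is empty; excluded.
def Pre_func (itemAssociation : List (List String)) : Prop :=
  ∃ g ∈ itemAssociation, g ≠ []
instance (itemAssociation : List (List String)) : Decidable (Pre_func itemAssociation) := by
  unfold Pre_func; infer_instance
def pvWitness_func : List (List String) := [["b", "a"], ["c", "b"], ["d"]]

def Spec_func (itemAssociation : List (List String)) (out : List String) : Prop :=
  out = func_alt itemAssociation
instance (itemAssociation : List (List String)) (out : List String) :
    Decidable (Spec_func itemAssociation out) := by unfold Spec_func; infer_instance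

-- ===== CLAIM (what is proved, stated in full; the proofs are below) =====
def Claim_equal_func : Prop := ∀ (itemAssociation : List (List String)),
  Dom_func itemAssociation → Pre_func itemAssociation →
  Spec_func itemAssociation (func itemAssociation)

-- ===== LEMMAS AND PROOFS =====

-- items, adjacency (sharing a group), reachability
def pvMem (ia : List (List String)) (x : String) : Prop := ∃ g ∈ ia, x ∈ g
def pvAdj (ia : List (List String)) (a b : String) : Prop := ∃ g ∈ ia, a ∈ g ∧ b ∈ g
def pvReach (ia : List (List String)) : String → String → Prop := Relation.ReflTransGen (pvAdj ia)

-- l is the sorted listing of the connected component of x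
def pvIsComp (ia : List (List String)) (x : String) (l : List String) : Prop :=
  ∃ e : List String, e.Nodup ∧ (∀ y, y ∈ e ↔ pvReach ia x y) ∧
    l = PySem.List.sorted e (fun y => y) false

-- the selection order: strictly more items wins, ties lexicographically smaller-or-equal
def pvLe (u v : List String) : Prop := v.length < u.length ∨ (u.length = v.length ∧ u ≤ v)

-- the common characterization of both programs' answer
def pvBest (ia : List (List String)) (v : List String) : Prop :=
  (∃ x, pvMem ia x ∧ pvIsComp ia x v) ∧
  (∀ x, pvMem ia x → ∀ l, pvIsComp ia x l → pvLe v l)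

theorem pvAdj_symm {ia : List (List String)} {a b : String} (h : pvAdj ia a b) : pvAdj ia b a := by
  obtain ⟨g, hg, ha, hb⟩ := h; exact ⟨g, hg, hb, ha⟩

theorem pvAdj_of_idx {ia : List (List String)} {k : Nat} (hk : k < ia.length) {a b : String}
    (ha : a ∈ ia[k]) (hb : b ∈ ia[k]) : pvAdj ia a b :=
  ⟨ia[k], List.getElem_mem hk, ha, hb⟩

theorem pvReach_symm {ia : List (List String)} {a b : String} (h : pvReach ia a b) :
    pvReach ia b a := by
  induction h with
  | refl => exact Relation.ReflTransGen.refl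
  | tail _ hadj ih =>
      exact Relation.ReflTransGen.trans (Relation.ReflTransGen.single (pvAdj_symm hadj)) ih

theorem pvReach_trans {ia : List (List String)} {a b c : String} (h : pvReach ia a b)
    (h' : pvReach ia b c) : pvReach ia a c := Relation.ReflTransGen.trans h h'

theorem pvReach_mem {ia : List (List String)} {a b : String} (h : pvReach ia a b)
    (ha : pvMem ia a) : pvMem ia b := by
  induction h with
  | refl => exact ha
  | tail _ hadj _ => obtain ⟨g, hg, _, hbg⟩ := hadj; exact ⟨g, hg, hbg⟩

-- a closed predicate absorbs reachability
theorem pvClosed_reach {ia : List (List String)} {P : String → Prop}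
    (hP : ∀ a b, pvAdj ia a b → P a → P b) {x y : String} (hx : P x) (h : pvReach ia x y) :
    P y := by
  induction h with
  | refl => exact hx
  | tail _ hadj ih => exact hP _ _ hadj ih

theorem pvIsComp_unique {ia : List (List String)} {x : String} {l₁ l₂ : List String}
    (h₁ : pvIsComp ia x l₁) (h₂ : pvIsComp ia x l₂) : l₁ = l₂ := by
  obtain ⟨e₁, hn₁, hm₁, rfl⟩ := h₁
  obtain ⟨e₂, hn₂, hm₂, rfl⟩ := h₂
  have hperm : e₁.Perm e₂ := by
    rw [List.perm_ext_iff_of_nodup hn₁ hn₂]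
    intro y; rw [hm₁ y, hm₂ y]
  exact PySem.List.sorted_eq_sorted_of_perm _ _ _ (fun a b h => h) hperm

theorem pvLe_refl (u : List String) : pvLe u u := Or.inr ⟨rfl, le_refl u⟩

theorem pvLe_trans {u v w : List String} (h₁ : pvLe u v) (h₂ : pvLe v w) : pvLe u w := by
  rcases h₁ with h₁ | ⟨h₁, h₁'⟩ <;> rcases h₂ with h₂ | ⟨h₂, h₂'⟩
  · exact Or.inl (by omega)
  · exact Or.inl (by omega)
  · exact Or.inl (by omega)
  · exact Or.inr ⟨by omega, le_trans h₁' h₂'⟩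

theorem pvLe_antisymm {u v : List String} (h₁ : pvLe u v) (h₂ : pvLe v u) : u = v := by
  rcases h₁ with h₁ | ⟨h₁, h₁'⟩ <;> rcases h₂ with h₂ | ⟨h₂, h₂'⟩
  · omega
  · omega
  · omega
  · exact le_antisymm h₁' h₂'

theorem pvBest_unique {ia : List (List String)} {v₁ v₂ : List String}
    (h₁ : pvBest ia v₁) (h₂ : pvBest ia v₂) : v₁ = v₂ := by
  obtain ⟨⟨x₁, hx₁, hc₁⟩, hmin₁⟩ := h₁
  obtain ⟨⟨x₂, hx₂, hc₂⟩, hmin₂⟩ := h₂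
  exact pvLe_antisymm (hmin₁ x₂ hx₂ _ hc₂) (hmin₂ x₁ hx₁ _ hc₁)

-- ===== the store dictionary =====

theorem pvFoldlNestedModify (F : Int → List String) (l : List Int)
    (d : PySem.Dict String (List Int)) :
    l.foldl (fun d i => (F i).foldl (fun d item => d.modify item [] (fun t => t ++ [i])) d) d
      = (l.flatMap (fun i => (F i).map (fun x => (x, i)))).foldl
          (fun d p => d.modify p.1 [] (fun t => t ++ [p.2])) d := by
  induction l generalizing d with
  | nil => rfl
  | cons i rest ih => simp [List.foldl_append, List.foldl_map, ih]

def pvPairs (ia : List (List String)) : List (String × Int) :=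
  (PySem.List.pyRange 0 (ia.length : Int) 1).flatMap
    (fun i => (PySem.List.pyGetD ia i []).map (fun x => (x, i)))

theorem pvBuildStore_getD (ia : List (List String)) (x : String) :
    (buildStore ia).getD x []
      = ((pvPairs ia).filter (fun p => p.1 == x)).map (fun p => p.2) := by
  unfold buildStore
  rw [pvFoldlNestedModify (fun i => PySem.List.pyGetD ia i [])]
  rw [PySem.Dict.getD_foldl_modify_append]
  rfl

theorem pvMem_store {ia : List (List String)} {x : String} {j : Int} :
    j ∈ (buildStore ia).getD x [] ↔
      ∃ (k : Nat) (hk : k < ia.length), j = (k : Int) ∧ x ∈ ia[k] := by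
  rw [pvBuildStore_getD]
  simp only [List.mem_map, List.mem_filter, pvPairs, List.mem_flatMap,
    PySem.List.mem_pyRange_one, beq_iff_eq]
  constructor
  · rintro ⟨⟨y, i⟩, ⟨⟨i', ⟨hi0, hin⟩, hmem⟩, hx⟩, rfl⟩
    simp only [Prod.mk.injEq] at hmem
    obtain ⟨z, hz, rfl, rfl⟩ := hmem
    subst hx
    have hkn : i'.toNat < ia.length := by omega
    refine ⟨i'.toNat, hkn, by omega, ?_⟩
    rwa [PySem.List.pyGetD_eq_getElem ia [] hi0 (by omega)] at hz
  · rintro ⟨k, hk, rfl, hxk⟩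
    refine ⟨(x, (k : Int)), ⟨⟨(k : Int), ⟨by positivity, by exact_mod_cast hk⟩, ?_⟩, by simp⟩, rfl⟩
    simp only [Prod.mk.injEq]
    refine ⟨x, ?_, by simp⟩
    rw [PySem.List.pyGetD_eq_getElem ia [] (by positivity) (by exact_mod_cast hk)]
    simpa using hxk

theorem pvSetContains {α : Type} [BEq α] [LawfulBEq α] (s : PySem.Set α) (x : α) :
    PySem.Set.contains s x = true ↔ x ∈ s := by
  simp [PySem.Set.contains]

theorem pvSetAdd_of_not_mem {α : Type} [BEq α] [LawfulBEq α] {s : PySem.Set α} {x : α}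
    (h : ¬ x ∈ s) : PySem.Set.add s x = s ++ [x] := by
  simp [PySem.Set.add, PySem.Set.contains, h]

theorem pvStore_keys (ia : List (List String)) :
    (buildStore ia).keys = PySem.Set.ofList ((pvPairs ia).map (fun p => p.1)) := by
  unfold buildStore
  rw [pvFoldlNestedModify (fun i => PySem.List.pyGetD ia i [])]
  have h := PySem.Dict.keys_foldl_modify_key (pvPairs ia) (fun p : String × Int => p.1)
    ([] : List Int)
    (fun (_ : PySem.Dict String (List Int)) (p : String × Int) (t : List Int) => t ++ [p.2])
    PySem.Dict.empty
  simp only [pvPairs] at h ⊢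
  rw [h]
  rfl

theorem pvMem_pairs_fst {ia : List (List String)} {x : String} :
    x ∈ (pvPairs ia).map (fun p => p.1) ↔ pvMem ia x := by
  simp only [List.mem_map, pvPairs, List.mem_flatMap, PySem.List.mem_pyRange_one]
  constructor
  · rintro ⟨⟨y, i⟩, ⟨i', ⟨hi0, hin⟩, hmem⟩, rfl⟩
    simp only [Prod.mk.injEq] at hmem
    obtain ⟨z, hz, rfl, rfl⟩ := hmem
    rw [PySem.List.pyGetD_eq_getElem ia [] hi0 hin] at hz
    exact ⟨_, List.getElem_mem _, hz⟩
  · rintro ⟨g, hg, hxg⟩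
    obtain ⟨k, hk, rfl⟩ := List.mem_iff_getElem.mp hg
    refine ⟨(x, (k : Int)), ⟨(k : Int), ⟨by positivity, by exact_mod_cast hk⟩, ?_⟩, rfl⟩
    simp only [Prod.mk.injEq]
    refine ⟨x, ?_, by simp⟩
    rw [PySem.List.pyGetD_eq_getElem ia [] (by positivity) (by exact_mod_cast hk)]
    exact hxg

theorem pvStore_keys_mem {ia : List (List String)} {x : String} :
    x ∈ (buildStore ia).keys ↔ pvMem ia x := by
  rw [pvStore_keys, PySem.Set.mem_ofList, pvMem_pairs_fst]

theorem pvStore_getD_len {ia : List (List String)} (x : String) :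
    ((buildStore ia).getD x []).length ≤ ia.flatten.length := by
  rw [pvBuildStore_getD]
  rw [List.length_map]
  calc (List.filter (fun p => p.1 == x) (pvPairs ia)).length ≤ (pvPairs ia).length :=
        List.length_filter_le _ _
    _ = ia.flatten.length := by
        unfold pvPairs
        rw [List.length_flatMap]
        have : (PySem.List.pyRange 0 (ia.length : Int) 1).map
            (fun i => ((PySem.List.pyGetD ia i []).map (fun x => (x, i))).length)
            = (PySem.List.pyRange 0 (ia.length : Int) 1).map
              (fun i => (PySem.List.pyGetD ia i []).length) := by
          simp
        rw [this]
        have h2 : (PySem.List.pyRange 0 (ia.length : Int) 1).map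
              (fun i => (PySem.List.pyGetD ia i []).length)
            = ((PySem.List.pyRange 0 (ia.length : Int) 1).map
              (fun i => PySem.List.pyGetD ia i [])).map List.length := by
          rw [List.map_map]; rfl
        rw [h2, PySem.List.map_pyGetD_pyRange_zero', List.length_flatten]

-- ===== A's inner `for c in itemAssociation[i]` fold =====

theorem pvFoldAccMono (store : PySem.Dict String (List Int)) :
    ∀ (g : List String) (V : PySem.Set String) (acc : List Int) (j : Int), j ∈ acc →
      j ∈ (g.foldl (fun (p : PySem.Set String × List Int) c =>
          if PySem.Set.contains p.1 c then p
          else (PySem.Set.add p.1 c, p.2 ++ store.getD c [])) (V, acc)).2 := by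
  intro g
  induction g with
  | nil => intro V acc j hj; exact hj
  | cons c g' ih =>
      intro V acc j hj
      simp only [List.foldl_cons]
      by_cases hcc : PySem.Set.contains V c = true
      · rw [if_pos hcc]; exact ih V acc j hj
      · rw [if_neg hcc]; exact ih _ _ j (List.mem_append_left _ hj)

theorem pvFoldA (store : PySem.Dict String (List Int)) (T : Nat)
    (hT : ∀ c, (store.getD c []).length ≤ T) :
    ∀ (g : List String) (V : PySem.Set String) (acc : List Int), V.Nodup →
    ∃ news : List String,
      (g.foldl (fun (p : PySem.Set String × List Int) c =>
          if PySem.Set.contains p.1 c then p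
          else (PySem.Set.add p.1 c, p.2 ++ store.getD c [])) (V, acc)).1 = V ++ news ∧
      (V ++ news).Nodup ∧
      (∀ y, y ∈ news ↔ y ∈ g ∧ ¬ y ∈ V) ∧
      (∀ j ∈ (g.foldl (fun (p : PySem.Set String × List Int) c =>
          if PySem.Set.contains p.1 c then p
          else (PySem.Set.add p.1 c, p.2 ++ store.getD c [])) (V, acc)).2,
        j ∈ acc ∨ ∃ c ∈ news, j ∈ store.getD c []) ∧
      (∀ c ∈ news, ∀ j ∈ store.getD c [],
        j ∈ (g.foldl (fun (p : PySem.Set String × List Int) c =>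
          if PySem.Set.contains p.1 c then p
          else (PySem.Set.add p.1 c, p.2 ++ store.getD c [])) (V, acc)).2) ∧
      (g.foldl (fun (p : PySem.Set String × List Int) c =>
          if PySem.Set.contains p.1 c then p
          else (PySem.Set.add p.1 c, p.2 ++ store.getD c [])) (V, acc)).2.length
        ≤ acc.length + news.length * T := by
  intro g
  induction g with
  | nil =>
      intro V acc hnd
      exact ⟨[], by simp, by simpa using hnd, by simp, by simp, by simp, by simp⟩
  | cons c g' ih =>
      intro V acc hnd
      by_cases hc : c ∈ V
      · have hcc : PySem.Set.contains V c = true := (pvSetContains V c).mpr hc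
        simp only [List.foldl_cons, hcc, if_pos]
        obtain ⟨news, h1, h2, h3, h4, h5, h6⟩ := ih V acc hnd
        refine ⟨news, h1, h2, fun y => ?_, h4, h5, h6⟩
        rw [h3 y]
        constructor
        · rintro ⟨hy, hyv⟩; exact ⟨List.mem_cons_of_mem _ hy, hyv⟩
        · rintro ⟨hy, hyv⟩
          rcases List.mem_cons.mp hy with rfl | hy
          · exact absurd hc hyv
          · exact ⟨hy, hyv⟩
      · have hcc : PySem.Set.contains V c = false := by
          rw [Bool.eq_false_iff]; intro h; exact hc ((pvSetContains V c).mp h)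
        simp only [List.foldl_cons, hcc, Bool.false_eq_true, if_false]
        rw [pvSetAdd_of_not_mem hc]
        have hnd' : (V ++ [c]).Nodup := by
          rw [List.nodup_append]
          refine ⟨hnd, List.nodup_singleton c, fun a ha b hb heq => ?_⟩
          simp only [List.mem_singleton] at hb
          subst hb; subst heq; exact hc ha
        obtain ⟨news, h1, h2, h3, h4, h5, h6⟩ := ih (V ++ [c]) (acc ++ store.getD c []) hnd'
        refine ⟨c :: news, ?_, ?_, ?_, ?_, ?_, ?_⟩
        · rw [h1, List.append_assoc]; rfl
        · rw [List.append_assoc] at h2; exact h2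
        · intro y
          rw [List.mem_cons, h3 y]
          simp only [List.mem_append, List.mem_cons]
          constructor
          · rintro (rfl | ⟨hy, hyv⟩)
            · exact ⟨Or.inl rfl, hc⟩
            · exact ⟨Or.inr hy, fun h => hyv (Or.inl h)⟩
          · rintro ⟨rfl | hy, hyv⟩
            · exact Or.inl rfl
            · by_cases hyc : y = c
              · exact Or.inl hyc
              · exact Or.inr ⟨hy, by tauto⟩
        · intro j hj
          rcases h4 j hj with hj' | ⟨c', hc', hjc'⟩
          · rcases List.mem_append.mp hj' with hj'' | hj''
            · exact Or.inl hj''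
            · exact Or.inr ⟨c, List.mem_cons_self .., hj''⟩
          · exact Or.inr ⟨c', List.mem_cons_of_mem _ hc', hjc'⟩
        · intro c' hc' j hj
          rcases List.mem_cons.mp hc' with rfl | hc''
          · by_cases hcn : c' ∈ news
            · exact h5 c' hcn j hj
            · have : j ∈ acc ++ store.getD c' [] := List.mem_append_right _ hj
              exact pvFoldAccMono store g' (V ++ [c']) (acc ++ store.getD c' []) j this
          · exact h5 c' hc'' j hj
        · calc _ ≤ (acc ++ store.getD c []).length + news.length * T := h6
            _ ≤ acc.length + (c :: news).length * T := by
                rw [List.length_append]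
                have := hT c
                simp only [List.length_cons]
                nlinarith

-- ===== A's `while q:` loop =====

theorem pvBfsA (ia : List (List String)) (store : PySem.Dict String (List Int))
    (hst : store = buildStore ia) (x : String) (W : PySem.Set String)
    (hflatW : ∀ (k : Nat) (hk : k < ia.length), ∀ y ∈ ia[k], y ∈ W) :
    ∀ (fuel : Nat) (q : List Int) (V : PySem.Set String) (temp : List String),
    V.Nodup → (∀ c ∈ V, c ∈ W) →
    (∀ i ∈ q, ∃ (k : Nat) (hk : k < ia.length), i = (k : Int) ∧ ∀ y ∈ ia[k], pvReach ia x y) →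
    (∀ c ∈ V, ∀ (k : Nat) (hk : k < ia.length), c ∈ ia[k] →
        (∀ y ∈ ia[k], y ∈ V) ∨ (k : Int) ∈ q) →
    (W.length - V.length) * (ia.flatten.length + 1) + q.length < fuel →
    ∃ Δ : List String,
      (bfsA ia store fuel q V temp).2 = temp ++ Δ ∧
      (∀ y, y ∈ (bfsA ia store fuel q V temp).1 ↔ y ∈ V ∨ y ∈ Δ) ∧
      (bfsA ia store fuel q V temp).1.Nodup ∧
      (∀ y ∈ Δ, pvReach ia x y) ∧
      (∀ i ∈ q, ∀ (k : Nat), k < ia.length → i = (k : Int) →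
        ∀ (hk : k < ia.length), ∀ y ∈ ia[k], y ∈ Δ) ∧
      (∀ c ∈ (bfsA ia store fuel q V temp).1, ∀ (k : Nat) (hk : k < ia.length), c ∈ ia[k] →
          ∀ y ∈ ia[k], y ∈ (bfsA ia store fuel q V temp).1) := by
  intro fuel
  induction fuel with
  | zero => intro q V temp _ _ _ _ hfuel; omega
  | succ fuel ih =>
      intro q V temp hVnd hVW hq hInv hfuel
      match q with
      | [] =>
          refine ⟨[], by simp [bfsA], by simp [bfsA], by simpa [bfsA] using hVnd, by simp,
            by simp, ?_⟩
          intro c hc k hk hck y hy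
          rcases hInv c (by simpa [bfsA] using hc) k hk hck with h | h
          · simpa [bfsA] using h y hy
          · simp at h
      | i :: rest =>
          obtain ⟨k, hk, rfl, hreach⟩ := hq i (List.mem_cons_self ..)
          have hg : PySem.List.pyGetD ia (k : Int) [] = ia[k] := by
            rw [PySem.List.pyGetD_eq_getElem ia [] (by positivity) (by exact_mod_cast hk)]
            simp
          have hbfs : bfsA ia store (fuel + 1) ((k : Int) :: rest) V temp
              = bfsA ia store fuel
                  (rest ++ ((ia[k] : List String).foldl (fun (p : PySem.Set String × List Int) c =>
                    if PySem.Set.contains p.1 c then p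
                    else (PySem.Set.add p.1 c, p.2 ++ store.getD c [])) (V, [])).2)
                  ((ia[k] : List String).foldl (fun (p : PySem.Set String × List Int) c =>
                    if PySem.Set.contains p.1 c then p
                    else (PySem.Set.add p.1 c, p.2 ++ store.getD c [])) (V, [])).1
                  (temp ++ ia[k]) := by
            rw [bfsA, hg]
          obtain ⟨news, hf1, hf2, hf3, hf4, hf5, hf6⟩ :=
            pvFoldA store ia.flatten.length
              (fun c => hst ▸ pvStore_getD_len c) ia[k] V [] hVnd
          set st := ((ia[k] : List String).foldl (fun (p : PySem.Set String × List Int) c =>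
                    if PySem.Set.contains p.1 c then p
                    else (PySem.Set.add p.1 c, p.2 ++ store.getD c [])) (V, []))
          have hnewsW : ∀ c ∈ V ++ news, c ∈ W := by
            intro c hc
            rcases List.mem_append.mp hc with h | h
            · exact hVW c h
            · exact hflatW k hk c ((hf3 c).mp h).1
          have hq' : ∀ i ∈ rest ++ st.2, ∃ (k' : Nat) (hk' : k' < ia.length),
              i = (k' : Int) ∧ ∀ y ∈ ia[k'], pvReach ia x y := by
            intro j hj
            rcases List.mem_append.mp hj with h | h
            · exact hq j (List.mem_cons_of_mem _ h)
            · rcases hf4 j h with h' | ⟨c, hcn, hjc⟩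
              · simp at h'
              · have hcg : c ∈ ia[k] := ((hf3 c).mp hcn).1
                rw [hst] at hjc
                obtain ⟨k', hk', rfl, hck'⟩ := pvMem_store.mp hjc
                refine ⟨k', hk', rfl, fun y hy => ?_⟩
                exact pvReach_trans (hreach c hcg)
                  (Relation.ReflTransGen.single (pvAdj_of_idx hk' hck' hy))
          have hInv' : ∀ c ∈ V ++ news, ∀ (k' : Nat) (hk' : k' < ia.length), c ∈ ia[k'] →
              (∀ y ∈ ia[k'], y ∈ V ++ news) ∨ (k' : Int) ∈ rest ++ st.2 := by
            intro c hc k' hk' hck'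
            rcases List.mem_append.mp hc with h | h
            · rcases hInv c h k' hk' hck' with h' | h'
              · exact Or.inl fun y hy => List.mem_append_left _ (h' y hy)
              · rcases List.mem_cons.mp h' with heq | h''
                · have : k' = k := by exact_mod_cast heq
                  subst this
                  refine Or.inl fun y hy => ?_
                  by_cases hyv : y ∈ V
                  · exact List.mem_append_left _ hyv
                  · exact List.mem_append_right _ ((hf3 y).mpr ⟨hy, hyv⟩)
                · exact Or.inr (List.mem_append_left _ h'')
            · refine Or.inr (List.mem_append_right _ ?_)
              refine hf5 c h (k' : Int) ?_
              rw [hst]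
              exact pvMem_store.mpr ⟨k', hk', rfl, hck'⟩
          have hndV' : (V ++ news).Nodup := hf2
          have hfuel' : (W.length - (V ++ news).length) * (ia.flatten.length + 1)
              + (rest ++ st.2).length < fuel := by
            have hsub : (V ++ news).length ≤ W.length := (hndV'.subperm hnewsW).length_le
            have hlen : (V ++ news).length = V.length + news.length := List.length_append ..
            have hacc : st.2.length ≤ news.length * ia.flatten.length := by
              simpa using hf6
            have hmul : (W.length - (V.length + news.length)) * (ia.flatten.length + 1)
                = (W.length - V.length) * (ia.flatten.length + 1)
                  - news.length * (ia.flatten.length + 1) := by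
              rw [← Nat.sub_sub, Nat.sub_mul]
            have hble : news.length * (ia.flatten.length + 1)
                ≤ (W.length - V.length) * (ia.flatten.length + 1) :=
              Nat.mul_le_mul_right _ (by omega)
            have hbc : news.length * (ia.flatten.length + 1)
                = news.length * ia.flatten.length + news.length := by ring
            have hcons : ((k : Int) :: rest).length = rest.length + 1 := by simp
            simp only [List.length_append]
            omega
          obtain ⟨Δ', hr1, hr2, hr3, hr4, hr5, hr6⟩ :=
            ih (rest ++ st.2) st.1 (temp ++ ia[k]) (by rw [hf1]; exact hndV')
              (by rw [hf1]; exact hnewsW) hq' (by rw [hf1]; exact hInv')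
              (by rw [hf1]; exact hfuel')
          refine ⟨ia[k] ++ Δ', ?_, ?_, ?_, ?_, ?_, ?_⟩
          · rw [hbfs, hr1, List.append_assoc]
          · intro y
            rw [hbfs, hr2 y, hf1]
            constructor
            · rintro (h | h)
              · rcases List.mem_append.mp h with h' | h'
                · exact Or.inl h'
                · exact Or.inr (List.mem_append_left _ ((hf3 y).mp h').1)
              · exact Or.inr (List.mem_append_right _ h)
            · rintro (h | h)
              · exact Or.inl (List.mem_append_left _ h)
              · rcases List.mem_append.mp h with h' | h'
                · by_cases hyv : y ∈ V
                  · exact Or.inl (List.mem_append_left _ hyv)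
                  · exact Or.inl (List.mem_append_right _ ((hf3 y).mpr ⟨h', hyv⟩))
                · exact Or.inr h'
          · rw [hbfs]; exact hr3
          · intro y hy
            rcases List.mem_append.mp hy with h | h
            · exact hreach y h
            · exact hr4 y h
          · intro j hj k' hk'n heq hk' y hy
            rcases List.mem_cons.mp hj with rfl | hjr
            · have : k' = k := by exact_mod_cast heq.symm
              subst this
              exact List.mem_append_left _ hy
            · exact List.mem_append_right _ (hr5 j (List.mem_append_left _ hjr) k' hk'n heq hk' y hy)
          · rw [hbfs]; exact hr6

-- ===== A's outer loop over the store's keys =====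

theorem pvMem_iff_flatten {ia : List (List String)} {x : String} :
    pvMem ia x ↔ x ∈ ia.flatten := by
  rw [List.mem_flatten]; rfl

theorem pvOuterA (ia : List (List String)) (store : PySem.Dict String (List Int))
    (hst : store = buildStore ia) :
    ∀ (ks : List String) (V : PySem.Set String) (res : List (List String)),
    V.Nodup →
    (∀ c ∈ V, pvMem ia c) →
    (∀ c ∈ V, ∀ (k : Nat) (hk : k < ia.length), c ∈ ia[k] → ∀ y ∈ ia[k], y ∈ V) →
    (∀ c ∈ V, ∃ e ∈ res, ∀ y, y ∈ e ↔ pvReach ia c y) →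
    (∀ e ∈ res, e.Nodup ∧ ∃ z, pvMem ia z ∧ ∀ y, y ∈ e ↔ pvReach ia z y) →
    (∀ x ∈ ks, pvMem ia x) →
    (∃ ext, (ks.foldl (fun (p : PySem.Set String × List (List String)) item =>
        if PySem.Set.contains p.1 item then p
        else
          let r := bfsA ia store
            ((ia.flatten.length + 1) * (ia.flatten.length + 1))
            (store.getD item []) (PySem.Set.add p.1 item) []
          (r.1, p.2 ++ [PySem.Set.ofList r.2])) (V, res)).2 = res ++ ext) ∧
    (∀ e ∈ (ks.foldl (fun (p : PySem.Set String × List (List String)) item =>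
        if PySem.Set.contains p.1 item then p
        else
          let r := bfsA ia store
            ((ia.flatten.length + 1) * (ia.flatten.length + 1))
            (store.getD item []) (PySem.Set.add p.1 item) []
          (r.1, p.2 ++ [PySem.Set.ofList r.2])) (V, res)).2,
      e.Nodup ∧ ∃ z, pvMem ia z ∧ ∀ y, y ∈ e ↔ pvReach ia z y) ∧
    (∀ x ∈ ks, ∃ e ∈ (ks.foldl (fun (p : PySem.Set String × List (List String)) item =>
        if PySem.Set.contains p.1 item then p
        else
          let r := bfsA ia store
            ((ia.flatten.length + 1) * (ia.flatten.length + 1))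
            (store.getD item []) (PySem.Set.add p.1 item) []
          (r.1, p.2 ++ [PySem.Set.ofList r.2])) (V, res)).2,
      ∀ y, y ∈ e ↔ pvReach ia x y) := by
  intro ks
  induction ks with
  | nil =>
      intro V res _ _ _ _ hres _
      exact ⟨⟨[], by simp⟩, by simpa using hres, by simp⟩
  | cons item ks' ih =>
      intro V res hVnd hVmem hVcl hVcomp hres hks
      by_cases hin : item ∈ V
      · have hcc : PySem.Set.contains V item = true := (pvSetContains V item).mpr hin
        have hstep : List.foldl (fun (p : PySem.Set String × List (List String)) item =>
        if PySem.Set.contains p.1 item then p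
        else
          let r := bfsA ia store
            ((ia.flatten.length + 1) * (ia.flatten.length + 1))
            (store.getD item []) (PySem.Set.add p.1 item) []
          (r.1, p.2 ++ [PySem.Set.ofList r.2])) (V, res) (item :: ks')
            = List.foldl (fun (p : PySem.Set String × List (List String)) item =>
        if PySem.Set.contains p.1 item then p
        else
          let r := bfsA ia store
            ((ia.flatten.length + 1) * (ia.flatten.length + 1))
            (store.getD item []) (PySem.Set.add p.1 item) []
          (r.1, p.2 ++ [PySem.Set.ofList r.2])) (V, res) ks' := by
          rw [List.foldl_cons]; congr 1; simp [hin]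
        rw [hstep]
        obtain ⟨⟨ext, hext⟩, hB, hC⟩ :=
          ih V res hVnd hVmem hVcl hVcomp hres (fun z hz => hks z (List.mem_cons_of_mem _ hz))
        refine ⟨⟨ext, hext⟩, hB, ?_⟩
        intro z hz
        rcases List.mem_cons.mp hz with rfl | hz'
        · obtain ⟨e, he, hcomp⟩ := hVcomp z hin
          exact ⟨e, hext ▸ List.mem_append_left _ he, hcomp⟩
        · exact hC z hz'
      · have hcc : PySem.Set.contains V item = false := by
          rw [Bool.eq_false_iff]; intro h; exact hin ((pvSetContains V item).mp h)
        simp only [List.foldl_cons, hcc, Bool.false_eq_true, if_false]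
        have hmemitem : pvMem ia item := hks item (List.mem_cons_self ..)
        have hVadd : PySem.Set.add V item = V ++ [item] := pvSetAdd_of_not_mem hin
        have hWnd : (PySem.Set.ofList ia.flatten).Nodup := PySem.Set.nodup_ofList _
        have hflatW : ∀ (k : Nat) (hk : k < ia.length), ∀ y ∈ ia[k],
            y ∈ PySem.Set.ofList ia.flatten := by
          intro k hk y hy
          rw [PySem.Set.mem_ofList, List.mem_flatten]
          exact ⟨ia[k], List.getElem_mem hk, hy⟩
        have hV₀nd : (V ++ [item]).Nodup := by
          rw [List.nodup_append]
          refine ⟨hVnd, List.nodup_singleton _, fun a ha b hb heq => ?_⟩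
          simp only [List.mem_singleton] at hb
          subst hb; subst heq; exact hin ha
        have hV₀W : ∀ c ∈ V ++ [item], c ∈ PySem.Set.ofList ia.flatten := by
          intro c hc
          rw [PySem.Set.mem_ofList, ← pvMem_iff_flatten]
          rcases List.mem_append.mp hc with h | h
          · exact hVmem c h
          · simp only [List.mem_singleton] at h; subst h; exact hmemitem
        have hq₀ : ∀ i ∈ store.getD item [], ∃ (k : Nat) (hk : k < ia.length),
            i = (k : Int) ∧ ∀ y ∈ ia[k], pvReach ia item y := by
          intro i hi
          rw [hst] at hi
          obtain ⟨k, hk, rfl, hik⟩ := pvMem_store.mp hi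
          exact ⟨k, hk, rfl, fun y hy =>
            Relation.ReflTransGen.single (pvAdj_of_idx hk hik hy)⟩
        have hInv₀ : ∀ c ∈ V ++ [item], ∀ (k : Nat) (hk : k < ia.length), c ∈ ia[k] →
            (∀ y ∈ ia[k], y ∈ V ++ [item]) ∨ (k : Int) ∈ store.getD item [] := by
          intro c hc k hk hck
          rcases List.mem_append.mp hc with h | h
          · exact Or.inl fun y hy => List.mem_append_left _ (hVcl c h k hk hck y hy)
          · simp only [List.mem_singleton] at h
            subst h
            exact Or.inr (by rw [hst]; exact pvMem_store.mpr ⟨k, hk, rfl, hck⟩)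
        have hT1 : 1 ≤ ia.flatten.length := by
          obtain ⟨g, hg, hxg⟩ := hmemitem
          have : item ∈ ia.flatten := List.mem_flatten.mpr ⟨g, hg, hxg⟩
          exact List.length_pos_of_mem this
        have hfuel₀ : ((PySem.Set.ofList ia.flatten).length - (V ++ [item]).length)
              * (ia.flatten.length + 1) + (store.getD item []).length
            < (ia.flatten.length + 1) * (ia.flatten.length + 1) := by
          have h1 : (PySem.Set.ofList ia.flatten).length ≤ ia.flatten.length :=
            PySem.Set.length_ofList_le _
          have h2 : (store.getD item []).length ≤ ia.flatten.length := by
            rw [hst]; exact pvStore_getD_len item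
          have h3 : 1 ≤ (V ++ [item]).length := by simp
          have h4 : (PySem.Set.ofList ia.flatten).length - (V ++ [item]).length
              ≤ ia.flatten.length - 1 := by omega
          have h5 := Nat.mul_le_mul_right (ia.flatten.length + 1) h4
          have h6 : (ia.flatten.length - 1) * (ia.flatten.length + 1) + 1
              ≤ ia.flatten.length * (ia.flatten.length + 1) := by
            have := Nat.mul_le_mul_right (ia.flatten.length + 1)
              (show ia.flatten.length - 1 + 1 ≤ ia.flatten.length by omega)
            nlinarith
          nlinarith
        obtain ⟨Δ, hd1, hd2, hd3, hd4, hd5, hd6⟩ :=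
          pvBfsA ia store hst item (PySem.Set.ofList ia.flatten) hflatW
            ((ia.flatten.length + 1) * (ia.flatten.length + 1))
            (store.getD item []) (V ++ [item]) [] hV₀nd hV₀W hq₀ hInv₀ hfuel₀
        rw [← hVadd] at hd1 hd2 hd3 hd6
        set r := bfsA ia store ((ia.flatten.length + 1) * (ia.flatten.length + 1))
          (store.getD item []) (PySem.Set.add V item) []
        have hxΔ : item ∈ Δ := by
          obtain ⟨g, hg, hxg⟩ := hmemitem
          obtain ⟨k, hk, rfl⟩ := List.mem_iff_getElem.mp hg
          have hkq : (k : Int) ∈ store.getD item [] := by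
            rw [hst]; exact pvMem_store.mpr ⟨k, hk, rfl, hxg⟩
          exact hd5 (k : Int) hkq k hk rfl hk item hxg
        have hVcl' : ∀ c ∈ r.1, ∀ (k : Nat) (hk : k < ia.length), c ∈ ia[k] →
            ∀ y ∈ ia[k], y ∈ r.1 := hd6
        have hcompV : ∀ y, pvReach ia item y → y ∈ r.1 := by
          intro y hy
          refine pvClosed_reach (P := fun z => z ∈ r.1) ?_ ?_ hy
          · intro a b hadj ha
            obtain ⟨g, hg, hag, hbg⟩ := hadj
            obtain ⟨k, hk, rfl⟩ := List.mem_iff_getElem.mp hg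
            exact hd6 a ha k hk hag b hbg
          · exact (hd2 item).mpr (Or.inl (by rw [hVadd]; exact List.mem_append_right _ (by simp)))
        have hVdisj : ∀ y ∈ V, ¬ pvReach ia item y := by
          intro y hyV hr
          exact hin (pvClosed_reach (P := fun z => z ∈ V)
            (fun a b hadj ha => by
              obtain ⟨g, hg, hag, hbg⟩ := hadj
              obtain ⟨k, hk, rfl⟩ := List.mem_iff_getElem.mp hg
              exact hVcl a ha k hk hag b hbg) hyV (pvReach_symm hr))
        have hcompΔ : ∀ y, y ∈ PySem.Set.ofList Δ ↔ pvReach ia item y := by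
          intro y
          rw [PySem.Set.mem_ofList]
          constructor
          · exact hd4 y
          · intro hy
            have hyr : y ∈ r.1 := hcompV y hy
            rcases (hd2 y).mp hyr with h | h
            · rw [hVadd] at h
              rcases List.mem_append.mp h with h' | h'
              · exact absurd hy (hVdisj y h')
              · simp only [List.mem_singleton] at h'; subst h'; exact hxΔ
            · exact h
        have hmem' : ∀ c ∈ r.1, pvMem ia c := by
          intro c hc
          rcases (hd2 c).mp hc with h | h
          · rw [hVadd] at h
            rcases List.mem_append.mp h with h' | h'
            · exact hVmem c h'
            · simp only [List.mem_singleton] at h'; subst h'; exact hmemitem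
          · exact pvReach_mem (hd4 c h) hmemitem
        have hcomp' : ∀ c ∈ r.1, ∃ e ∈ res ++ [PySem.Set.ofList Δ],
            ∀ y, y ∈ e ↔ pvReach ia c y := by
          intro c hc
          rcases (hd2 c).mp hc with h | h
          · rw [hVadd] at h
            rcases List.mem_append.mp h with h' | h'
            · obtain ⟨e, he, hcomp⟩ := hVcomp c h'
              exact ⟨e, List.mem_append_left _ he, hcomp⟩
            · simp only [List.mem_singleton] at h'
              subst h'
              exact ⟨PySem.Set.ofList Δ, List.mem_append_right _ (by simp), hcompΔ⟩
          · refine ⟨PySem.Set.ofList Δ, List.mem_append_right _ (by simp), fun y => ?_⟩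
            rw [hcompΔ y]
            have hrc : pvReach ia item c := hd4 c h
            constructor
            · intro h'; exact pvReach_trans (pvReach_symm hrc) h'
            · intro h'; exact pvReach_trans hrc h'
        have hres' : ∀ e ∈ res ++ [PySem.Set.ofList Δ],
            e.Nodup ∧ ∃ z, pvMem ia z ∧ ∀ y, y ∈ e ↔ pvReach ia z y := by
          intro e he
          rcases List.mem_append.mp he with h | h
          · exact hres e h
          · simp only [List.mem_singleton] at h
            subst h
            exact ⟨PySem.Set.nodup_ofList _, item, hmemitem, hcompΔ⟩
        have hr2Δ : r.2 = Δ := by rw [hd1]; simp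
        rw [hr2Δ]
        obtain ⟨⟨ext, hext⟩, hB, hC⟩ :=
          ih r.1 (res ++ [PySem.Set.ofList Δ]) hd3 hmem' hVcl' hcomp' hres'
            (fun z hz => hks z (List.mem_cons_of_mem _ hz))
        refine ⟨⟨[PySem.Set.ofList Δ] ++ ext, by rw [hext, List.append_assoc]⟩, hB, ?_⟩
        intro z hz
        rcases List.mem_cons.mp hz with rfl | hz'
        · refine ⟨PySem.Set.ofList Δ, ?_, hcompΔ⟩
          rw [hext]
          exact List.mem_append_left _ (List.mem_append_right _ (by simp))
        · exact hC z hz'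

-- ===== A's final sort/prefix/sort selection =====

theorem pvTakeSortA_mem :
    ∀ (l : List (List String)) (m : Nat),
    l.Pairwise (fun a b => b.length ≤ a.length) → (∀ y ∈ l, y.length ≤ m) →
    ∀ e, e ∈ takeSortA l m ↔
      ∃ e₀ ∈ l, e₀.length = m ∧ e = PySem.List.sorted e₀ (fun s => s) false := by
  intro l
  induction l with
  | nil => intro m _ _ e; simp [takeSortA]
  | cons x l' ih =>
      intro m hpw hbd e
      rw [List.pairwise_cons] at hpw
      by_cases hxm : x.length = m
      · rw [show takeSortA (x :: l') m
            = PySem.List.sorted x (fun s => s) false :: takeSortA l' m from by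
              simp [takeSortA, hxm]]
        rw [List.mem_cons, ih m hpw.2 (fun y hy => hbd y (List.mem_cons_of_mem _ hy)) e]
        constructor
        · rintro (rfl | ⟨e₀, he₀, hlen, rfl⟩)
          · exact ⟨x, List.mem_cons_self .., hxm, rfl⟩
          · exact ⟨e₀, List.mem_cons_of_mem _ he₀, hlen, rfl⟩
        · rintro ⟨e₀, he₀, hlen, rfl⟩
          rcases List.mem_cons.mp he₀ with rfl | he₀'
          · exact Or.inl rfl
          · exact Or.inr ⟨e₀, he₀', hlen, rfl⟩
      · rw [show takeSortA (x :: l') m = [] from by simp [takeSortA, hxm]]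
        simp only [List.not_mem_nil, false_iff]
        rintro ⟨e₀, he₀, hlen, rfl⟩
        rcases List.mem_cons.mp he₀ with rfl | he₀'
        · exact hxm hlen
        · have h1 := hpw.1 e₀ he₀'
          have h2 := hbd x (List.mem_cons_self ..)
          omega

-- the two DecidableLT instances on List String give the same sort
theorem pvSortedLL (xs : List (List String)) (rev : Bool) :
    @PySem.List.sorted (List String) (List String) List.instLT
      (fun a b => a.decidableLT b) xs (fun x => x) rev
    = @PySem.List.sorted (List String) (List String) List.instLinearOrder.toLT
      LinearOrder.toDecidableLT xs (fun x => x) rev := by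
  have h : (fun (a b : List String) => a.decidableLT b)
      = (LinearOrder.toDecidableLT (α := List String)) := by
    funext a b; exact Subsingleton.elim _ _
  rw [h]

theorem pvFuncA (ia : List (List String)) (hpre : Pre_func ia) : pvBest ia (func ia) := by
  obtain ⟨g₀, hg₀, hg₀ne⟩ := hpre
  obtain ⟨x₀, hx₀⟩ := List.exists_mem_of_ne_nil g₀ hg₀ne
  have hx₀mem : pvMem ia x₀ := ⟨g₀, hg₀, hx₀⟩
  obtain ⟨⟨ext, hext⟩, hB, hC⟩ :=
    pvOuterA ia (buildStore ia) rfl (buildStore ia).keys PySem.Set.empty []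
      (by simp [PySem.Set.empty]) (by simp [PySem.Set.empty]) (by simp [PySem.Set.empty])
      (by simp [PySem.Set.empty]) (by simp) (fun z hz => pvStore_keys_mem.mp hz)
  simp only [func]
  set F := List.foldl (fun (p : PySem.Set String × List (List String)) item =>
      if PySem.Set.contains p.1 item then p
      else
        let r := bfsA ia (buildStore ia)
          ((ia.flatten.length + 1) * (ia.flatten.length + 1))
          ((buildStore ia).getD item []) (PySem.Set.add p.1 item) []
        (r.1, p.2 ++ [PySem.Set.ofList r.2])) (PySem.Set.empty, []) (buildStore ia).keys
    with hF
  have hC₀ := hC x₀ (pvStore_keys_mem.mpr hx₀mem)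
  obtain ⟨e₀', he₀', _⟩ := hC₀
  have hresne : F.2 ≠ [] := List.ne_nil_of_mem he₀'
  have hsortne : PySem.List.sorted F.2 (fun x => x.length) true ≠ [] := by
    rw [Ne, PySem.List.sorted_eq_nil_iff]; exact hresne
  obtain ⟨m, t, hmt⟩ := List.exists_cons_of_ne_nil hsortne
  have hhead : PySem.List.pyGetD (PySem.List.sorted F.2 (fun x => x.length) true) 0 [] = m := by
    rw [hmt, PySem.List.pyGetD_eq_getElem _ _ (by norm_num) (by simp)]
    simp
  have hmax : ∀ e ∈ F.2, e.length ≤ m.length :=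
    PySem.List.key_head_sorted_rev_ge F.2 (fun x => x.length) hmt
  have hm_mem : m ∈ F.2 := by
    have : m ∈ PySem.List.sorted F.2 (fun x => x.length) true := by
      rw [hmt]; exact List.mem_cons_self ..
    rwa [PySem.List.mem_sorted] at this
  have hts := pvTakeSortA_mem (PySem.List.sorted F.2 (fun x => x.length) true) m.length
    (PySem.List.sorted_pairwise_rev F.2 (fun x => x.length))
    (fun y hy => hmax y ((PySem.List.mem_sorted ..).mp hy))
  have htsne : takeSortA (PySem.List.sorted F.2 (fun x => x.length) true) m.length ≠ [] := by
    have : PySem.List.sorted m (fun s => s) false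
        ∈ takeSortA (PySem.List.sorted F.2 (fun x => x.length) true) m.length := by
      rw [hts]
      exact ⟨m, by rw [hmt]; exact List.mem_cons_self .., rfl, rfl⟩
    exact List.ne_nil_of_mem this
  have hfinne : PySem.List.sorted
      (takeSortA (PySem.List.sorted F.2 (fun x => x.length) true) m.length)
      (fun x => x) false ≠ [] := by
    rw [Ne, PySem.List.sorted_eq_nil_iff]; exact htsne
  obtain ⟨v, t', hvt⟩ := List.exists_cons_of_ne_nil hfinne
  have hheadv : PySem.List.pyGetD (PySem.List.sorted
      (takeSortA (PySem.List.sorted F.2 (fun x => x.length) true) m.length)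
      (fun x => x) false) 0 [] = v := by
    rw [hvt, PySem.List.pyGetD_eq_getElem _ _ (by norm_num) (by simp)]
    simp
  rw [hhead, hheadv]
  have hv_mem : v ∈ takeSortA (PySem.List.sorted F.2 (fun x => x.length) true) m.length := by
    have : v ∈ PySem.List.sorted
        (takeSortA (PySem.List.sorted F.2 (fun x => x.length) true) m.length)
        (fun x => x) false := by rw [hvt]; exact List.mem_cons_self ..
    rwa [PySem.List.mem_sorted] at this
  have hv_min : ∀ u ∈ takeSortA (PySem.List.sorted F.2 (fun x => x.length) true) m.length,
      v ≤ u := by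
    apply PySem.List.key_head_sorted_le _ (fun x => x) (t := t')
    rw [← pvSortedLL]
    exact hvt
  obtain ⟨e₀, he₀s, he₀len, hve₀⟩ := (hts v).mp hv_mem
  have he₀res : e₀ ∈ F.2 := (PySem.List.mem_sorted ..).mp he₀s
  obtain ⟨he₀nd, z₀, hz₀mem, hz₀comp⟩ := hB e₀ he₀res
  have hvlen : v.length = m.length := by
    rw [hve₀, PySem.List.length_sorted, he₀len]
  constructor
  · exact ⟨z₀, hz₀mem, e₀, he₀nd, hz₀comp, hve₀⟩
  · intro x hx l hl
    obtain ⟨e', he', hcompx⟩ := hC x (pvStore_keys_mem.mpr hx)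
    obtain ⟨he'nd, _⟩ := hB e' he'
    have hlsort : l = PySem.List.sorted e' (fun s => s) false := by
      obtain ⟨e, hend, hem, rfl⟩ := hl
      exact pvIsComp_unique ⟨e, hend, hem, rfl⟩ ⟨e', he'nd, hcompx, rfl⟩
    have hllen : l.length = e'.length := by rw [hlsort, PySem.List.length_sorted]
    by_cases hlen : e'.length = m.length
    · have : PySem.List.sorted e' (fun s => s) false
          ∈ takeSortA (PySem.List.sorted F.2 (fun x => x.length) true) m.length := by
        rw [hts]
        exact ⟨e', (PySem.List.mem_sorted ..).mpr he', hlen, rfl⟩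
      have hle := hv_min _ this
      rw [← hlsort] at hle
      exact Or.inr ⟨by omega, hle⟩
    · have := hmax e' he'
      exact Or.inl (by omega)

-- ===== B: components as reachability classes =====

-- c lists, without repetition, exactly one reachability class of gs with a witness item
def pvIsClassB (gs : List (List String)) (c : PySem.Set String) : Prop :=
  c.Nodup ∧ ∃ z, pvMem gs z ∧ ∀ y, y ∈ c ↔ pvReach gs z y

theorem pvAdj_append {gs : List (List String)} {g : List String} {a b : String} :
    pvAdj (gs ++ [g]) a b ↔ pvAdj gs a b ∨ (a ∈ g ∧ b ∈ g) := by
  constructor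
  · rintro ⟨g', hg', ha, hb⟩
    rcases List.mem_append.mp hg' with h | h
    · exact Or.inl ⟨g', h, ha, hb⟩
    · simp only [List.mem_singleton] at h; subst h; exact Or.inr ⟨ha, hb⟩
  · rintro (⟨g', hg', ha, hb⟩ | ⟨ha, hb⟩)
    · exact ⟨g', List.mem_append_left _ hg', ha, hb⟩
    · exact ⟨g, List.mem_append_right _ (by simp), ha, hb⟩

theorem pvReach_mono_append {gs : List (List String)} {g : List String} {z y : String}
    (h : pvReach gs z y) : pvReach (gs ++ [g]) z y := by
  induction h with
  | refl => exact Relation.ReflTransGen.refl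
  | tail _ hadj ih => exact Relation.ReflTransGen.tail ih (pvAdj_append.mpr (Or.inl hadj))

theorem pvMem_append_iff {gs : List (List String)} {g : List String} {x : String} :
    pvMem (gs ++ [g]) x ↔ pvMem gs x ∨ x ∈ g := by
  constructor
  · rintro ⟨g', hg', hx⟩
    rcases List.mem_append.mp hg' with h | h
    · exact Or.inl ⟨g', h, hx⟩
    · simp only [List.mem_singleton] at h; subst h; exact Or.inr hx
  · rintro (⟨g', hg', hx⟩ | hx)
    · exact ⟨g', List.mem_append_left _ hg', hx⟩
    · exact ⟨g, List.mem_append_right _ (by simp), hx⟩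

-- a class touching no item of g is unchanged by appending g
theorem pvReach_append_stable {gs : List (List String)} {g : List String}
    {c : PySem.Set String} {z : String}
    (hc : ∀ y, y ∈ c ↔ pvReach gs z y) (hdis : ∀ x ∈ c, ¬ x ∈ g) (y : String) :
    pvReach (gs ++ [g]) z y ↔ pvReach gs z y := by
  constructor
  · intro h
    have hy : y ∈ c := by
      refine pvClosed_reach (P := fun w => w ∈ c) ?_ ((hc z).mpr Relation.ReflTransGen.refl) h
      intro a b hadj ha
      rcases pvAdj_append.mp hadj with hadj' | ⟨hag, _⟩
      · exact (hc b).mpr (Relation.ReflTransGen.tail ((hc a).mp ha) hadj')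
      · exact absurd hag (hdis a ha)
    exact (hc y).mp hy
  · exact pvReach_mono_append

-- two classes sharing an element have the same members
theorem pvClass_eq {gs : List (List String)} {c c' : PySem.Set String} {x : String}
    (hc : pvIsClassB gs c) (hc' : pvIsClassB gs c') (hx : x ∈ c) (hx' : x ∈ c') :
    ∀ y, y ∈ c ↔ y ∈ c' := by
  obtain ⟨_, z, _, hm⟩ := hc
  obtain ⟨_, z', _, hm'⟩ := hc'
  have hzx : pvReach gs z x := (hm x).mp hx
  have hz'x : pvReach gs z' x := (hm' x).mp hx'
  intro y
  rw [hm y, hm' y]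
  constructor
  · intro h; exact pvReach_trans hz'x (pvReach_trans (pvReach_symm hzx) h)
  · intro h; exact pvReach_trans hzx (pvReach_trans (pvReach_symm hz'x) h)

theorem pvInterNe {c m : PySem.Set String} :
    PySem.Set.inter c m ≠ [] ↔ ∃ x ∈ c, x ∈ m := by
  rw [Ne, List.eq_nil_iff_forall_not_mem]
  push_neg
  constructor
  · rintro ⟨x, hx⟩
    rw [PySem.Set.mem_inter _ _ _] at hx
    exact ⟨x, hx.1, hx.2⟩
  · rintro ⟨x, hx, hxm⟩
    exact ⟨x, (PySem.Set.mem_inter _ _ _).mpr ⟨hx, hxm⟩⟩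

-- B's inner fold: absorbs exactly the components meeting g, keeps the rest in order
theorem pvInnerB (gs : List (List String)) (g : List String) :
    ∀ (comps : List (PySem.Set String)) (m : PySem.Set String)
      (acc : List (PySem.Set String)),
    m.Nodup →
    (∀ c ∈ comps, pvIsClassB gs c) →
    (∀ y ∈ g, y ∈ m) →
    (∀ c ∈ comps, (∃ x ∈ c, x ∈ m) ↔ (∃ x ∈ c, x ∈ g)) →
    (comps.foldl mergeStep (m, acc)).1.Nodup ∧
    (∀ y, y ∈ (comps.foldl mergeStep (m, acc)).1 ↔
        y ∈ m ∨ ∃ c ∈ comps, (∃ x ∈ c, x ∈ g) ∧ y ∈ c) ∧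
    (∀ d ∈ (comps.foldl mergeStep (m, acc)).2,
        d ∈ acc ∨ (d ∈ comps ∧ ¬ ∃ x ∈ d, x ∈ g)) ∧
    (∀ d ∈ acc, d ∈ (comps.foldl mergeStep (m, acc)).2) ∧
    (∀ d ∈ comps, (¬ ∃ x ∈ d, x ∈ g) → d ∈ (comps.foldl mergeStep (m, acc)).2) := by
  intro comps
  induction comps with
  | nil =>
      intro m acc hnd _ _ _
      exact ⟨hnd, fun y => by simp, fun d hd => Or.inl hd, fun d hd => hd, by simp⟩
  | cons c rest ih =>
      intro m acc hnd hcls hgm hmg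
      have hcIsCls : pvIsClassB gs c := hcls c (List.mem_cons_self ..)
      by_cases hmeet : ∃ x ∈ c, x ∈ m
      · have hcg : ∃ x ∈ c, x ∈ g := (hmg c (List.mem_cons_self ..)).mp hmeet
        have hcond : PySem.Set.inter c m ≠ [] := pvInterNe.mpr hmeet
        have hstep : mergeStep (m, acc) c = (PySem.Set.union m c, acc) := by
          simp [mergeStep, hcond]
        rw [List.foldl_cons, hstep]
        have hnd' : (PySem.Set.union m c).Nodup := PySem.Set.nodup_union _ _ hnd
        have hgm' : ∀ y ∈ g, y ∈ PySem.Set.union m c := fun y hy =>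
          (PySem.Set.mem_union _ _ _).mpr (Or.inl (hgm y hy))
        have hmg' : ∀ c' ∈ rest, (∃ x ∈ c', x ∈ PySem.Set.union m c) ↔ (∃ x ∈ c', x ∈ g) := by
          intro c' hc'
          constructor
          · rintro ⟨x, hxc', hxu⟩
            rcases (PySem.Set.mem_union _ _ _).mp hxu with hxm | hxc
            · exact (hmg c' (List.mem_cons_of_mem _ hc')).mp ⟨x, hxc', hxm⟩
            · obtain ⟨x₀, hx₀c, hx₀g⟩ := hcg
              have := pvClass_eq hcIsCls (hcls c' (List.mem_cons_of_mem _ hc')) hxc hxc'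
              exact ⟨x₀, (this x₀).mp hx₀c, hx₀g⟩
          · rintro ⟨x, hxc', hxg⟩
            exact ⟨x, hxc', (PySem.Set.mem_union _ _ _).mpr (Or.inl (hgm x hxg))⟩
        obtain ⟨i1, i2, i3, i4, i5⟩ := ih (PySem.Set.union m c) acc hnd'
          (fun c' hc' => hcls c' (List.mem_cons_of_mem _ hc')) hgm' hmg'
        refine ⟨i1, ?_, ?_, i4, ?_⟩
        · intro y
          rw [i2 y]
          constructor
          · rintro (hy | ⟨c', hc', hc'g, hyc'⟩)
            · rcases (PySem.Set.mem_union _ _ _).mp hy with h | h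
              · exact Or.inl h
              · exact Or.inr ⟨c, List.mem_cons_self .., hcg, h⟩
            · exact Or.inr ⟨c', List.mem_cons_of_mem _ hc', hc'g, hyc'⟩
          · rintro (hy | ⟨c', hc', hc'g, hyc'⟩)
            · exact Or.inl ((PySem.Set.mem_union _ _ _).mpr (Or.inl hy))
            · rcases List.mem_cons.mp hc' with rfl | hc''
              · exact Or.inl ((PySem.Set.mem_union _ _ _).mpr (Or.inr hyc'))
              · exact Or.inr ⟨c', hc'', hc'g, hyc'⟩
        · intro d hd
          rcases i3 d hd with h | ⟨h1, h2⟩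
          · exact Or.inl h
          · exact Or.inr ⟨List.mem_cons_of_mem _ h1, h2⟩
        · intro d hd hdg
          rcases List.mem_cons.mp hd with rfl | hd'
          · exact absurd hcg hdg
          · exact i5 d hd' hdg
      · have hcond : ¬ PySem.Set.inter c m ≠ [] := fun h => hmeet (pvInterNe.mp h)
        have hstep : mergeStep (m, acc) c = (m, acc ++ [c]) := by
          simp only [mergeStep]
          rw [if_neg hcond]
        rw [List.foldl_cons, hstep]
        have hcngg : ¬ ∃ x ∈ c, x ∈ g := fun h =>
          hmeet ((hmg c (List.mem_cons_self ..)).mpr h)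
        obtain ⟨i1, i2, i3, i4, i5⟩ := ih m (acc ++ [c]) hnd
          (fun c' hc' => hcls c' (List.mem_cons_of_mem _ hc')) hgm
          (fun c' hc' => hmg c' (List.mem_cons_of_mem _ hc'))
        refine ⟨i1, ?_, ?_, ?_, ?_⟩
        · intro y
          rw [i2 y]
          constructor
          · rintro (hy | ⟨c', hc', hc'g, hyc'⟩)
            · exact Or.inl hy
            · exact Or.inr ⟨c', List.mem_cons_of_mem _ hc', hc'g, hyc'⟩
          · rintro (hy | ⟨c', hc', hc'g, hyc'⟩)
            · exact Or.inl hy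
            · rcases List.mem_cons.mp hc' with rfl | hc''
              · exact absurd hc'g hcngg
              · exact Or.inr ⟨c', hc'', hc'g, hyc'⟩
        · intro d hd
          rcases i3 d hd with h | ⟨h1, h2⟩
          · rcases List.mem_append.mp h with h' | h'
            · exact Or.inl h'
            · simp only [List.mem_singleton] at h'
              subst h'
              exact Or.inr ⟨List.mem_cons_self .., hcngg⟩
          · exact Or.inr ⟨List.mem_cons_of_mem _ h1, h2⟩
        · intro d hd
          exact i4 d (List.mem_append_left _ hd)
        · intro d hd hdg
          rcases List.mem_cons.mp hd with rfl | hd'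
          · exact i4 d (List.mem_append_right _ (by simp))
          · exact i5 d hd' hdg

-- B's processing of one group preserves "comps = the classes of the groups seen so far"
theorem pvStepB_spec (gs : List (List String)) (g : List String)
    (comps : List (PySem.Set String))
    (hcls : ∀ c ∈ comps, pvIsClassB gs c)
    (hcov : ∀ x, pvMem gs x → ∃ c ∈ comps, x ∈ c) :
    (∀ c ∈ stepB comps g, pvIsClassB (gs ++ [g]) c) ∧
    (∀ x, pvMem (gs ++ [g]) x → ∃ c ∈ stepB comps g, x ∈ c) := by
  by_cases hg : g = []
  · subst hg
    rw [show stepB comps [] = comps from by simp [stepB]]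
    constructor
    · intro c hc
      obtain ⟨hnd, z, hz, hm⟩ := hcls c hc
      refine ⟨hnd, z, pvMem_append_iff.mpr (Or.inl hz), fun y => ?_⟩
      rw [hm y]
      exact (pvReach_append_stable hm (fun x _ h => (List.not_mem_nil h).elim) y).symm
    · intro x hx
      rcases pvMem_append_iff.mp hx with h | h
      · exact hcov x h
      · exact absurd h (List.not_mem_nil)
  · have hstep : stepB comps g
        = (comps.foldl mergeStep (PySem.Set.ofList g, [])).2
          ++ [(comps.foldl mergeStep (PySem.Set.ofList g, [])).1] := by
      simp [stepB, hg]
    obtain ⟨i1, i2, i3, i4, i5⟩ := pvInnerB gs g comps (PySem.Set.ofList g) []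
      (PySem.Set.nodup_ofList _) hcls (fun y hy => (PySem.Set.mem_ofList _ _).mpr hy)
      (fun c _ => by
        constructor
        · rintro ⟨x, hx, hxm⟩; exact ⟨x, hx, (PySem.Set.mem_ofList _ _).mp hxm⟩
        · rintro ⟨x, hx, hxg⟩; exact ⟨x, hx, (PySem.Set.mem_ofList _ _).mpr hxg⟩)
    set inner := comps.foldl mergeStep (PySem.Set.ofList g, []) with hinner
    have hx₀ : g.head hg ∈ g := List.head_mem hg
    set x₀ := g.head hg with hx₀def
    -- merged-component membership characterization
    have hmergemem : ∀ y, y ∈ inner.1 ↔ pvReach (gs ++ [g]) x₀ y := by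
      intro y
      constructor
      · intro hy0
        rcases (i2 y).mp hy0 with hy | ⟨c, hc, ⟨w, hwc, hwg⟩, hyc⟩
        · exact Relation.ReflTransGen.single
            (pvAdj_append.mpr (Or.inr ⟨hx₀, (PySem.Set.mem_ofList _ _).mp hy⟩))
        · obtain ⟨_, z, _, hm⟩ := hcls c hc
          have hwy : pvReach gs w y :=
            pvReach_trans (pvReach_symm ((hm w).mp hwc)) ((hm y).mp hyc)
          exact pvReach_trans
            (Relation.ReflTransGen.single (pvAdj_append.mpr (Or.inr ⟨hx₀, hwg⟩)))
            (pvReach_mono_append hwy)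
      · intro hy
        refine pvClosed_reach (P := fun w => w ∈ inner.1) ?_ ?_ hy
        · intro a b hadj ha
          rcases pvAdj_append.mp hadj with hadj' | ⟨hag, hbg⟩
          · rw [i2] at ha
            rcases ha with ham | ⟨c, hc, hcg, hac⟩
            · -- a ∈ g, adjacent within gs, so a is an item of gs; its class meets g
              have hag' : a ∈ g := (PySem.Set.mem_ofList _ _).mp ham
              obtain ⟨g', hg', hag'', -⟩ := id hadj'
              obtain ⟨c, hc, hac⟩ := hcov a ⟨g', hg', hag''⟩
              obtain ⟨_, z, _, hm⟩ := hcls c hc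
              have hbc : b ∈ c := (hm b).mpr (Relation.ReflTransGen.tail ((hm a).mp hac) hadj')
              exact (i2 b).mpr (Or.inr ⟨c, hc, ⟨a, hac, hag'⟩, hbc⟩)
            · obtain ⟨_, z, _, hm⟩ := hcls c hc
              have hbc : b ∈ c := (hm b).mpr (Relation.ReflTransGen.tail ((hm a).mp hac) hadj')
              exact (i2 b).mpr (Or.inr ⟨c, hc, hcg, hbc⟩)
          · exact (i2 b).mpr (Or.inl ((PySem.Set.mem_ofList _ _).mpr hbg))
        · exact (i2 x₀).mpr (Or.inl ((PySem.Set.mem_ofList _ _).mpr hx₀))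
    constructor
    · intro c hc
      rw [hstep] at hc
      rcases List.mem_append.mp hc with h | h
      · rcases i3 c h with h' | ⟨h1, h2⟩
        · exact absurd h' (List.not_mem_nil)
        · obtain ⟨hnd, z, hz, hm⟩ := hcls c h1
          refine ⟨hnd, z, pvMem_append_iff.mpr (Or.inl hz), fun y => ?_⟩
          rw [hm y]
          exact (pvReach_append_stable hm
            (fun x hx hxg => h2 ⟨x, hx, hxg⟩) y).symm
      · simp only [List.mem_singleton] at h
        subst h
        exact ⟨i1, x₀, pvMem_append_iff.mpr (Or.inr hx₀), hmergemem⟩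
    · intro x hx
      rcases pvMem_append_iff.mp hx with h | h
      · obtain ⟨c, hc, hxc⟩ := hcov x h
        by_cases hcg : ∃ w ∈ c, w ∈ g
        · refine ⟨inner.1, ?_, (i2 x).mpr (Or.inr ⟨c, hc, hcg, hxc⟩)⟩
          rw [hstep]; exact List.mem_append_right _ (by simp)
        · refine ⟨c, ?_, hxc⟩
          rw [hstep]; exact List.mem_append_left _ (i5 c hc hcg)
      · refine ⟨inner.1, ?_, (i2 x).mpr (Or.inl ((PySem.Set.mem_ofList _ _).mpr h))⟩
        rw [hstep]; exact List.mem_append_right _ (by simp)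

-- B's outer fold over the groups
theorem pvFoldB :
    ∀ (rest gs : List (List String)) (comps : List (PySem.Set String)),
    (∀ c ∈ comps, pvIsClassB gs c) →
    (∀ x, pvMem gs x → ∃ c ∈ comps, x ∈ c) →
    (∀ c ∈ rest.foldl stepB comps, pvIsClassB (gs ++ rest) c) ∧
    (∀ x, pvMem (gs ++ rest) x → ∃ c ∈ rest.foldl stepB comps, x ∈ c) := by
  intro rest
  induction rest with
  | nil => intro gs comps hcls hcov; simpa using ⟨hcls, hcov⟩
  | cons g rest' ih =>
      intro gs comps hcls hcov
      obtain ⟨hcls', hcov'⟩ := pvStepB_spec gs g comps hcls hcov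
      have h := ih (gs ++ [g]) (stepB comps g) hcls' hcov'
      rw [List.append_assoc] at h
      simpa using h

-- B's selection fold
theorem pvSelStep (best : Option (List String)) (c : PySem.Set String) :
    ∃ b', selStep best c = some b' ∧
      pvLe b' (PySem.List.sorted c (fun x => x) false) ∧
      (∀ b₀, best = some b₀ → pvLe b' b₀) ∧
      (b' = PySem.List.sorted c (fun x => x) false ∨ best = some b') := by
  cases best with
  | none =>
      exact ⟨PySem.List.sorted c (fun x => x) false, rfl, pvLe_refl _,
        fun b₀ h => by simp at h, Or.inl rfl⟩
  | some b =>
      set s := PySem.List.sorted c (fun x => x) false with hs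
      by_cases hcond : b.length < s.length ∨ (s.length = b.length ∧ s < b)
      · refine ⟨s, by simp [selStep, ← hs, hcond], pvLe_refl _, ?_, Or.inl rfl⟩
        rintro b₀ h
        injection h with h; subst h
        rcases hcond with h | ⟨h1, h2⟩
        · exact Or.inl h
        · exact Or.inr ⟨h1, le_of_lt h2⟩
      · refine ⟨b, by simp [selStep, ← hs, hcond], ?_, fun b₀ h => by
          injection h with h; subst h; exact pvLe_refl _, Or.inr rfl⟩
        push_neg at hcond
        by_cases hlen : s.length = b.length
        · exact Or.inr ⟨hlen.symm, hcond.2 hlen⟩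
        · exact Or.inl (by omega)

theorem pvSelB :
    ∀ (comps : List (PySem.Set String)) (best : Option (List String)),
    (∀ b, comps.foldl selStep best = some b →
      ((∃ c ∈ comps, b = PySem.List.sorted c (fun x => x) false) ∨ best = some b) ∧
      (∀ c ∈ comps, pvLe b (PySem.List.sorted c (fun x => x) false)) ∧
      (∀ b₀, best = some b₀ → pvLe b b₀)) ∧
    (∀ b₀, best = some b₀ → ∃ b, comps.foldl selStep best = some b) ∧
    (comps ≠ [] → ∃ b, comps.foldl selStep best = some b) := by
  intro comps
  induction comps with
  | nil =>
      intro best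
      refine ⟨?_, ?_, fun h => absurd rfl h⟩
      · intro b hb
        simp only [List.foldl_nil] at hb
        exact ⟨Or.inr hb, by simp, fun b₀ h => by
          rw [hb] at h; injection h with h; subst h; exact pvLe_refl _⟩
      · intro b₀ h; exact ⟨b₀, by simpa using h⟩
  | cons c rest ih =>
      intro best
      obtain ⟨b', hb', hle_s, hle_best, hcase⟩ := pvSelStep best c
      have hfold : (c :: rest).foldl selStep best = rest.foldl selStep (selStep best c) := by
        rw [List.foldl_cons]
      refine ⟨?_, ?_, ?_⟩
      · intro b hb
        rw [hfold] at hb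
        obtain ⟨horigin, hmin, hvs⟩ := (ih (selStep best c)).1 b hb
        have hbb' : pvLe b b' := hvs b' (by rw [hb'])
        refine ⟨?_, ?_, ?_⟩
        · rcases horigin with ⟨c', hc', heq⟩ | heq
          · exact Or.inl ⟨c', List.mem_cons_of_mem _ hc', heq⟩
          · rw [hb'] at heq
            injection heq with heq; subst heq
            rcases hcase with h | h
            · exact Or.inl ⟨c, List.mem_cons_self .., h⟩
            · exact Or.inr h
        · intro c' hc'
          rcases List.mem_cons.mp hc' with rfl | hc''
          · exact pvLe_trans hbb' hle_s
          · exact hmin c' hc''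
        · intro b₀ h
          exact pvLe_trans hbb' (hle_best b₀ h)
      · intro b₀ _
        rw [hfold]
        exact (ih (selStep best c)).2.1 b' (by rw [hb'])
      · intro _
        rw [hfold]
        exact (ih (selStep best c)).2.1 b' (by rw [hb'])

theorem pvFuncAlt (ia : List (List String)) (hpre : Pre_func ia) : pvBest ia (func_alt ia) := by
  obtain ⟨g₀, hg₀, hg₀ne⟩ := hpre
  obtain ⟨x₀, hx₀⟩ := List.exists_mem_of_ne_nil g₀ hg₀ne
  obtain ⟨hcls, hcov⟩ := pvFoldB ia [] []
    (by intro c hc; exact absurd hc (List.not_mem_nil))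
    (by rintro x ⟨g, hg, _⟩; exact absurd hg (List.not_mem_nil))
  rw [List.nil_append] at hcls hcov
  set comps := ia.foldl stepB [] with hcomps
  obtain ⟨c₀, hc₀, hx₀c₀⟩ := hcov x₀ ⟨g₀, hg₀, hx₀⟩
  obtain ⟨b, hb⟩ := (pvSelB comps none).2.2 (List.ne_nil_of_mem hc₀)
  obtain ⟨horigin, hmin, _⟩ := (pvSelB comps none).1 b hb
  have hfa : func_alt ia = b := by
    simp only [func_alt, ← hcomps, hb, Option.getD_some]
  rw [hfa]
  constructor
  · rcases horigin with ⟨c, hc, rfl⟩ | h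
    · obtain ⟨hnd, z, hz, hm⟩ := hcls c hc
      exact ⟨z, hz, c, hnd, hm, rfl⟩
    · simp at h
  · intro x hx l hl
    obtain ⟨cx, hcx, hxcx⟩ := hcov x hx
    obtain ⟨hnd, z, hz, hm⟩ := hcls cx hcx
    have hzx : pvReach ia z x := (hm x).mp hxcx
    have hcompx : pvIsComp ia x (PySem.List.sorted cx (fun y => y) false) := by
      refine ⟨cx, hnd, fun y => ?_, rfl⟩
      rw [hm y]
      constructor
      · intro h; exact pvReach_trans (pvReach_symm hzx) h
      · intro h; exact pvReach_trans hzx h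
    have hleq : l = PySem.List.sorted cx (fun y => y) false := pvIsComp_unique hl hcompx
    rw [hleq]
    exact hmin cx hcx

-- ===== VERDICT (by name: the statement is the Claim_ definition above) =====
theorem func_spec : Claim_equal_func := by
  intro ia _ hpre
  unfold Spec_func
  exact pvBest_unique (pvFuncA ia hpre) (pvFuncAlt ia hpre)
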